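-- pv_equiv track=rewrite | github.com/il-d44/adzuna-pipeline-analysis | description_analysis.py | single_count_word_category
-- ===== SOURCE A (Python) =====
-- from collections import Counter
--
-- def single_count_word_category(processed_words, word_category_list):
--     # Create a mapping of normalized (lowercase) to original word names
--     word_category_mapping = {word.lower(): word for word in word_category_list}
--
--     # Normalize category names into a set for efficient matching
--     word_category_set = set(word_category_mapping.keys())
--
--     # Initialize a Counter for technology occurrences
--     word_count = Counter()
--
--     # Iterate through processed words
--     for word in processed_words:
--         if word in word_category_set:
--             word_count[word] += 1
--
--     # Map the results back to the original technology names
--     mapped_word_count = {word_category_mapping[word]: count for word, count in word_count.items()}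
--     return mapped_word_count
-- ===== SOURCE B (Python) =====
-- def single_count_word_category(processed_words, word_category_list):
--     # Sort the matching words so equal words are adjacent, count them by
--     # run-length over the sorted list, and emit in first-appearance order.
--     mapping = {w.lower(): w for w in word_category_list}
--     matched = [w for w in processed_words if w in mapping]
--     firsts = list(dict.fromkeys(matched))
--     s = sorted(matched)
--     counts = {}
--     i = 0
--     n = len(s)
--     while i < n:
--         j = i + 1
--         while j < n and s[j] == s[i]:
--             j += 1
--         counts[s[i]] = j - i
--         i = j
--     return {mapping[w]: counts[w] for w in firsts}
-- ===== Notes on version B (the rewrite author's own statement) =====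
-- stated objective: alternative
-- what changed: B replaces A's incremental hash counter with sort-based counting: it filters the matching words, sorts them so equal words are adjacent, counts each word by run-length over the sorted list, and emits the counts in first-appearance order taken from an ordered dedup.
import Mathlib
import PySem

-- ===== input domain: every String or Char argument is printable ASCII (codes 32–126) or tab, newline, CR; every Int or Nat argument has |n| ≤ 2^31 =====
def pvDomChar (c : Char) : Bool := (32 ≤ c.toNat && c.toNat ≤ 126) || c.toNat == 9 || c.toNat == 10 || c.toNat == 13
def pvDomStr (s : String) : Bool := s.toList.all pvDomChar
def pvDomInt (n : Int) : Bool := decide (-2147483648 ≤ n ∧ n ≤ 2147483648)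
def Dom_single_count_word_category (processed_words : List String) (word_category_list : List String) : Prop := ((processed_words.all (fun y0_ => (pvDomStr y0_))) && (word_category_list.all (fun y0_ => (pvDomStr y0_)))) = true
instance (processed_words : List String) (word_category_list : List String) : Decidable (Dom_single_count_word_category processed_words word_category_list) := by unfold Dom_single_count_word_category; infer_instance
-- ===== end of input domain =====

-- B replaces A's incremental hash counter with sort-based counting: sort the matched
-- words, count each by run-length over the sorted list, emit in first-appearance
-- order (objective: alternative algorithm).

-- ===== PORT A =====
def single_count_word_category (processed_words : List String) (word_category_list : List String) : List (String × Int) :=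
  -- word_category_mapping = {word.lower(): word for word in word_category_list}
  let word_category_mapping : PySem.Dict String String :=
    word_category_list.foldl (fun d word => d.insert (PySem.Str.lower word) word) PySem.Dict.empty
  -- word_category_set = set(word_category_mapping.keys())
  let word_category_set : PySem.Set String := PySem.Set.ofList word_category_mapping.keys
  -- for word in processed_words: if word in word_category_set: word_count[word] += 1
  let word_count : PySem.Dict String Int :=
    processed_words.foldl
      (fun d word => if word_category_set.contains word then d.modify word 0 (· + 1) else d)
      PySem.Dict.empty
  -- {word_category_mapping[word]: count for word, count in word_count.items()}
  -- (the lookup never misses: every counted word is a key of the mapping; getD "" is exact there)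
  let mapped_word_count : PySem.Dict String Int :=
    word_count.items.foldl (fun d p => d.insert (word_category_mapping.getD p.1 "") p.2) PySem.Dict.empty
  mapped_word_count.items

-- ===== PORT B =====
-- B's while loop over the sorted list: the inner 'while s[j]==s[i]' run is the
-- takeWhile prefix, advancing i past the run is the dropWhile suffix (exact:
-- equal elements are consecutive positions).
def pvRunsAux (s : List String) (acc : PySem.Dict String Int) : PySem.Dict String Int :=
  match s with
  | [] => acc
  | x :: xs =>
      pvRunsAux (xs.dropWhile (fun y => y == x))
        (acc.insert x (1 + ((xs.takeWhile (fun y => y == x)).length : Int)))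
termination_by s.length
decreasing_by
  have := List.length_dropWhile_le (fun y => y == x) xs
  simp only [List.length_cons]
  omega

def single_count_word_category_alt (processed_words : List String) (word_category_list : List String) : List (String × Int) :=
  -- mapping = {w.lower(): w for w in word_category_list}
  let mapping : PySem.Dict String String :=
    word_category_list.foldl (fun d w => d.insert (PySem.Str.lower w) w) PySem.Dict.empty
  -- matched = [w for w in processed_words if w in mapping]
  let matched : List String := processed_words.filter (fun w => mapping.contains w)
  -- firsts = list(dict.fromkeys(matched))
  let firsts : List String := PySem.List.dedup matched
  -- s = sorted(matched); counts = run-length count over s (while loop, see pvRunsAux)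
  let counts : PySem.Dict String Int :=
    pvRunsAux (PySem.List.sorted matched (fun w => w) false) PySem.Dict.empty
  -- {mapping[w]: counts[w] for w in firsts}  (both lookups exact via getD: w in mapping, w in counts)
  (firsts.foldl
    (fun d w => d.insert (mapping.getD w "") (counts.getD w 0))
    (PySem.Dict.empty : PySem.Dict String Int)).items

-- ===== PRECONDITION & SPEC =====
def Spec_single_count_word_category (processed_words : List String) (word_category_list : List String) (out : List (String × Int)) : Prop := out = single_count_word_category_alt processed_words word_category_list
instance (processed_words : List String) (word_category_list : List String) (out : List (String × Int)) : Decidable (Spec_single_count_word_category processed_words word_category_list out) := by unfold Spec_single_count_word_category; infer_instance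

-- ===== CLAIM (what is proved, stated in full; the proofs are below) =====
def Claim_equal_single_count_word_category : Prop := ∀ (processed_words : List String) (word_category_list : List String), Dom_single_count_word_category processed_words word_category_list → Spec_single_count_word_category processed_words word_category_list (single_count_word_category processed_words word_category_list)

-- ===== LEMMAS AND PROOFS =====

-- A's counting loop is the Counter of the filtered word list
theorem wordcount_eq_counter (pred : String → Bool) (pw : List String) :
    pw.foldl (fun d word => if pred word then d.modify word 0 (· + 1) else d)
        (PySem.Dict.empty : PySem.Dict String Int)
      = PySem.Dict.counter (pw.filter pred) := by
  rw [PySem.Dict.counter_eq_foldl, ← List.foldl_filter]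

-- run-length counting over a ≤-sorted list is exact occurrence counting
theorem runs_getD (s : List String) (acc : PySem.Dict String Int) (w : String)
    (h : s.Pairwise (· ≤ ·)) :
    (pvRunsAux s acc).getD w 0
      = if w ∈ s then (s.count w : Int) else acc.getD w 0 := by
  fun_induction pvRunsAux s acc with
  | case1 acc => simp
  | case2 acc x xs ih =>
    set t := xs.takeWhile (fun y => y == x) with ht
    set r := xs.dropWhile (fun y => y == x) with hr
    have hxs : xs = t ++ r := (List.takeWhile_append_dropWhile).symm
    have hrsub : r.Sublist (x :: xs) := (List.dropWhile_sublist _).trans (List.sublist_cons_self _ _)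
    have hrpw : r.Pairwise (· ≤ ·) := h.sublist hrsub
    have hxle : ∀ y ∈ xs, x ≤ y := by
      intro y hy; exact (List.pairwise_cons.mp h).1 y hy
    have hxr : x ∉ r := by
      intro hxin
      cases hz : r with
      | nil => rw [hz] at hxin; cases hxin
      | cons z r' =>
        have hzx : (z == x) = false := by
          have := List.head?_dropWhile_not (fun y => y == x) xs
          rw [← hr, hz] at this; simpa using this
        have hzne : z ≠ x := by simpa using hzx
        have hzmem : z ∈ xs := by
          have hsub := (List.dropWhile_sublist (fun y => y == x) (l := xs)).subset
          rw [← hr, hz] at hsub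
          exact hsub List.mem_cons_self
        have hxz : x ≤ z := hxle z hzmem
        rw [hz] at hxin
        rcases List.mem_cons.mp hxin with rfl | hxin'
        · exact absurd rfl hzne
        · rw [hz] at hrpw
          have hzle : z ≤ x := (List.pairwise_cons.mp hrpw).1 x hxin'
          exact hzne (le_antisymm hzle hxz)
    have htall : ∀ y ∈ t, y = x := by
      intro y hy
      have := List.mem_takeWhile_imp (p := fun y => y == x) (by rw [← ht]; exact hy)
      simpa using this
    have hcountt : t.count x = t.length := by
      rw [List.count_eq_length]
      intro y hy
      simp [htall y hy]
    rw [ih hrpw]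
    by_cases hwx : w = x
    · subst hwx
      simp only [hxr, if_false]
      rw [PySem.Dict.getD_insert]
      simp only [if_pos, List.mem_cons, true_or]
      have hc : (w :: xs).count w = 1 + t.length := by
        rw [List.count_cons_self, hxs, List.count_append, hcountt,
          List.count_eq_zero.mpr hxr]
        omega
      rw [hc]; push_cast; ring
    · have hwt : w ∉ t := fun hw => hwx (htall w hw)
      have hmem : w ∈ x :: xs ↔ w ∈ r := by
        rw [hxs]
        simp only [List.mem_cons, List.mem_append]
        constructor
        · rintro (rfl | hw | hw)
          · exact absurd rfl hwx
          · exact absurd hw hwt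
          · exact hw
        · intro hw; exact Or.inr (Or.inr hw)
      have hcnt : (x :: xs).count w = r.count w := by
        rw [List.count_cons_of_ne (Ne.symm hwx), hxs, List.count_append,
          List.count_eq_zero.mpr hwt]
        omega
      by_cases hwr : w ∈ r
      · simp [hwr, hmem.mpr hwr, hcnt]
      · have : w ∉ x :: xs := fun h' => hwr (hmem.mp h')
        simp only [hwr, if_false, this, if_false]
        rw [PySem.Dict.getD_insert]
        have hwb : (w == x) = false := by simpa using hwx
        simp [hwx]

theorem single_count_word_category_eq (processed_words word_category_list : List String) :
    single_count_word_category processed_words word_category_list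
      = single_count_word_category_alt processed_words word_category_list := by
  unfold single_count_word_category single_count_word_category_alt
  set mapping := word_category_list.foldl
      (fun d w => d.insert (PySem.Str.lower w) w) (PySem.Dict.empty : PySem.Dict String String)
    with hmap
  have hpred : ∀ w, (PySem.Set.ofList mapping.keys).contains w = mapping.contains w := by
    intro w
    rcases h : mapping.contains w with _ | _
    · apply Bool.eq_false_iff.mpr
      intro hc
      have : w ∈ mapping.keys := (PySem.Set.mem_ofList _ _).mp ((PySem.Set.contains_iff _ _).mp hc)
      rw [← PySem.Dict.contains_iff_mem_keys] at this
      rw [h] at this; cases this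
    · exact (PySem.Set.contains_iff _ _).mpr ((PySem.Set.mem_ofList _ _).mpr
        ((PySem.Dict.contains_iff_mem_keys _ _).mp h))
  simp only [hpred]
  set matched := processed_words.filter (fun w => mapping.contains w) with hmatched
  rw [wordcount_eq_counter (fun w => mapping.contains w) processed_words,
    PySem.Dict.items_counter, List.foldl_map, PySem.List.dedup_eq_ofList]
  -- both sides now fold over Set.ofList matched; the inserted counts agree memberwise
  apply congrArg
  apply List.foldl_ext
  intro d w hw
  have hwm : w ∈ matched := (PySem.Set.mem_ofList _ _).mp hw
  have hws : w ∈ PySem.List.sorted matched (fun w => w) false :=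
    (PySem.List.mem_sorted matched (fun w => w) false w).mpr hwm
  rw [runs_getD _ _ _ (PySem.List.sorted_pairwise matched (fun w => w)),
    if_pos hws,
    List.Perm.count_eq (PySem.List.sorted_perm matched (fun w => w) false)]

-- ===== VERDICT (by name: the statement is the Claim_ definition above) =====
theorem single_count_word_category_spec : Claim_equal_single_count_word_category := by
  intro pw wc _
  exact single_count_word_category_eq pw wc
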